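-- pv_equiv track=rewrite | github.com/cristihainic/topcoder | Quipu.py | readKnots
-- ===== SOURCE A (Python) =====
-- def readKnots(knots):
--
--     decoded = 0
--     last_found_dash = 0
--
--     for i in range(1, len(knots)):
--         if knots[i] == '-':
--             decoded = decoded * 10 + (i - last_found_dash - 1)
--             last_found_dash = i
--
--     return decoded
-- ===== SOURCE B (Python) =====
-- def readKnots(knots):
--     parts = knots[1:].split('-')
--     decoded = 0
--     for seg in parts[:-1]:
--         decoded = decoded * 10 + len(seg)
--     return decoded
-- ===== Notes on version B (the rewrite author's own statement) =====
-- stated objective: simpler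
-- what changed: Replaces the index loop with explicit last-dash bookkeeping by splitting the tail of the string on the dash character and folding the lengths of all segments but the last into the number; the split runs in C, which also made B measurably faster.
import Mathlib
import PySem

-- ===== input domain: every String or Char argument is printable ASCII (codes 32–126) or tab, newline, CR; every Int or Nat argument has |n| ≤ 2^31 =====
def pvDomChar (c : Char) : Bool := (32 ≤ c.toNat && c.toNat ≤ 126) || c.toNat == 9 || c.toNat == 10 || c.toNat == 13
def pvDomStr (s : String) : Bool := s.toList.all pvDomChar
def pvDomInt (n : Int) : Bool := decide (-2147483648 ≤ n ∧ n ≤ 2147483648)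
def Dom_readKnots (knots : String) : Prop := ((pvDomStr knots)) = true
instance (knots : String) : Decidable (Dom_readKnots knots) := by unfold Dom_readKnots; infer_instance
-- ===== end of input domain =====

-- B replaces A's index loop with dash bookkeeping by split-on-dash plus a fold over segment lengths (objective: simpler).

-- ===== PORT A =====
-- one step of A's loop body at index i, state (decoded, last_found_dash)
def readKnotsStep (cs : List Char) (st : Int × Int) (i : Int) : Int × Int :=
  if PySem.List.pyGet? cs i = some '-' then (st.1 * 10 + (i - st.2 - 1), i) else st

def readKnots (knots : String) : Int :=
  ((PySem.List.pyRange 1 (PySem.List.len knots.toList) 1).foldl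
      (readKnotsStep knots.toList) (0, 0)).1

-- ===== PORT B =====
def readKnots_alt (knots : String) : Int :=
  let parts := (PySem.List.slice knots.toList (some 1) none).splitOn '-'   -- knots[1:].split('-')
  parts.dropLast.foldl (fun d s => d * 10 + (s.length : Int)) 0            -- for seg in parts[:-1]

-- ===== PRECONDITION & SPEC =====
def Spec_readKnots (knots : String) (out : Int) : Prop := out = readKnots_alt knots
instance (knots : String) (out : Int) : Decidable (Spec_readKnots knots out) := by unfold Spec_readKnots; infer_instance

-- ===== CLAIM (what is proved, stated in full; the proofs are below) =====
def Claim_equal_readKnots : Prop := ∀ (knots : String), Dom_readKnots knots → Spec_readKnots knots (readKnots knots)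

-- ===== LEMMAS AND PROOFS =====

-- character-level scan: state (decoded, chars since last dash)
def fAux : List Char → Int → Int → Int
  | [], d, _ => d
  | c :: t, d, cur => if c = '-' then fAux t (d * 10 + cur) 0 else fAux t d (cur + 1)

-- segment-level scan matching fAux: collapse all segments but the last
def bAux : List (List Char) → Int → Int → Int
  | [], d, _ => d
  | [_], d, _ => d
  | s :: ss, d, cur => bAux ss (d * 10 + cur + (s.length : Int)) 0

lemma fold_eq_fAux (cs : List Char) :
    ∀ (t : List Char) (k : Nat), cs.drop k = t → ∀ (d last : Int),
      ((PySem.List.pyRange (k : Int) cs.length 1).foldl (readKnotsStep cs) (d, last)).1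
        = fAux t d ((k : Int) - last - 1) := by
  intro t
  induction t with
  | nil =>
      intro k hk d last
      have hlen : cs.length ≤ k := by
        by_contra h
        have := List.drop_eq_nil_iff.mp hk
        omega
      rw [PySem.List.pyRange_one_eq_nil (by exact_mod_cast hlen)]
      simp [fAux]
  | cons c rest ih =>
      intro k hk d last
      have hklt : k < cs.length := by
        by_contra h
        rw [List.drop_eq_nil_of_le (by omega)] at hk
        exact (List.cons_ne_nil _ _) hk.symm
      have hget : cs[k]? = some c := by
        have h0 : (cs.drop k)[0]? = some c := by rw [hk]; rfl
        rw [List.getElem?_drop] at h0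
        simpa using h0
      rw [PySem.List.pyRange_one_cons (by exact_mod_cast hklt)]
      have hdrop : cs.drop (k + 1) = rest := by
        have h1 : cs.drop (k + 1) = (cs.drop k).drop 1 := by rw [List.drop_drop]
        rw [h1, hk]; rfl
      simp only [List.foldl_cons, readKnotsStep, PySem.List.pyGet?_natCast, hget]
      by_cases hc : c = '-'
      · subst hc
        simp only [fAux, if_true]
        have h2 := ih (k + 1) hdrop (d * 10 + ((k : Int) - last - 1)) (k : Int)
        push_cast at h2
        rw [show (k : Int) + 1 - (k : Int) - 1 = 0 by ring] at h2
        exact h2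
      · have hne : ¬ (some c = some '-') := by simp [hc]
        rw [if_neg hne]
        simp only [fAux, if_neg hc]
        have h2 := ih (k + 1) hdrop d last
        push_cast at h2
        rw [show (k : Int) + 1 - last - 1 = (k : Int) - last - 1 + 1 by ring] at h2
        exact h2

lemma bAux_modifyHead (c : Char) (s : List Char) (ss : List (List Char)) (d cur : Int) :
    bAux ((c :: s) :: ss) d cur = bAux (s :: ss) d (cur + 1) := by
  cases ss with
  | nil => simp [bAux]
  | cons s' ss' =>
      simp only [bAux]
      congr 1
      push_cast [List.length_cons]
      ring

lemma fAux_eq_bAux : ∀ (l : List Char) (d cur : Int),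
    fAux l d cur = bAux (l.splitOn '-') d cur := by
  intro l
  induction l with
  | nil => intro d cur; simp [fAux, List.splitOn, List.splitOnP_nil, bAux]
  | cons c t ih =>
      intro d cur
      simp only [List.splitOn, List.splitOnP_cons] at *
      by_cases hc : c = '-'
      · subst hc
        simp only [beq_self_eq_true, if_true]
        obtain ⟨s', ss', hsplit⟩ : ∃ s' ss', t.splitOnP (· == '-') = s' :: ss' := by
          cases h : t.splitOnP (· == '-') with
          | nil => exact absurd h (List.splitOnP_ne_nil _ t)
          | cons a b => exact ⟨a, b, rfl⟩
        rw [fAux, if_pos rfl, ih, hsplit]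
        cases ss' with
        | nil => simp [bAux]
        | cons s'' ss'' => simp [bAux]
      · have hb : (c == '-') = false := by simp [hc]
        rw [hb, if_neg (by simp)]
        obtain ⟨s', ss', hsplit⟩ : ∃ s' ss', t.splitOnP (· == '-') = s' :: ss' := by
          cases h : t.splitOnP (· == '-') with
          | nil => exact absurd h (List.splitOnP_ne_nil _ t)
          | cons a b => exact ⟨a, b, rfl⟩
        rw [fAux, if_neg hc, ih, hsplit]
        simpa using (bAux_modifyHead c s' ss' d cur).symm

lemma bAux_eq_foldl : ∀ (segs : List (List Char)) (d : Int),
    bAux segs d 0 = segs.dropLast.foldl (fun d s => d * 10 + (s.length : Int)) d := by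
  intro segs
  induction segs with
  | nil => intro d; simp [bAux]
  | cons s ss ih =>
      intro d
      cases ss with
      | nil => simp [bAux]
      | cons s' ss' =>
          simp only [bAux, List.dropLast_cons₂, List.foldl_cons]
          rw [ih]
          ring_nf

-- ===== VERDICT (by name: the statement is the Claim_ definition above) =====
theorem readKnots_spec : Claim_equal_readKnots := by
  intro knots _
  unfold Spec_readKnots readKnots readKnots_alt
  rw [PySem.List.slice_from_one]
  have h := fold_eq_fAux knots.toList (knots.toList.drop 1) 1 rfl 0 0
  simp only [PySem.List.len_eq, Nat.cast_one] at h ⊢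
  rw [h]
  norm_num
  rw [fAux_eq_bAux, bAux_eq_foldl]
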